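-- pv_equiv track=rewrite | github.com/tariqshahzad7777/Inverted-index-positional-index-in-IR | pythonProject2/main.py | not_items
-- ===== SOURCE A (Python) =====
-- def not_items(list1):        #a function to get not of given doc ids
--
--     filelist=[*range(1, 51, 1)]
--     reslist=[]
--     for f in range(len(filelist)):
--         if filelist[f] in list1:
--             continue
--         else:
--             reslist.append(filelist[f])
--     return reslist
-- ===== SOURCE B (Python) =====
-- def not_items(list1):
--     return sorted(set(range(1, 51)) - set(list1))
-- ===== Notes on version B (the rewrite author's own statement) =====
-- stated objective: simpler
-- what changed: Replaces the per-index loop with an O(n) list-membership test per element by a bulk set difference {1..50} - set(list1) followed by a sort.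
import Mathlib
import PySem

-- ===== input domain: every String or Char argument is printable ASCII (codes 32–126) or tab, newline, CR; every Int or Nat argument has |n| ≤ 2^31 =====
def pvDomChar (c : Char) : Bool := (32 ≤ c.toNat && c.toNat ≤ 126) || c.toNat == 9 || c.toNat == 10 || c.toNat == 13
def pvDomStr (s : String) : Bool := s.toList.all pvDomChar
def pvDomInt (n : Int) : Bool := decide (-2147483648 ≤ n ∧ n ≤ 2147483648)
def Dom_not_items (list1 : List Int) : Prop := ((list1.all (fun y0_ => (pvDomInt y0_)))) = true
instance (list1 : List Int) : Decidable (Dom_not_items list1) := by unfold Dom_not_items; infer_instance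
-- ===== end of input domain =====

-- B replaces A's per-index loop and membership branch by one set difference plus a sort (objective: simpler).

-- ===== PORT A =====
def not_items (list1 : List Int) : List Int :=
  let filelist := PySem.List.pyRange 1 51 1
  (PySem.List.pyRange 0 (PySem.List.len filelist) 1).foldl
    (fun reslist f =>
      if list1.contains (PySem.List.pyGetD filelist f 0) then
        reslist
      else
        reslist ++ [PySem.List.pyGetD filelist f 0]) []

-- ===== PORT B =====
def not_items_alt (list1 : List Int) : List Int :=
  PySem.List.sorted
    (PySem.Set.diff (PySem.Set.ofList (PySem.List.pyRange 1 51 1)) (PySem.Set.ofList list1))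
    (fun x => x) false

-- ===== PRECONDITION & SPEC =====
def Spec_not_items (list1 : List Int) (out : List Int) : Prop := out = not_items_alt list1
instance (list1 : List Int) (out : List Int) : Decidable (Spec_not_items list1 out) := by unfold Spec_not_items; infer_instance

-- ===== CLAIM (what is proved, stated in full; the proofs are below) =====
def Claim_equal_not_items : Prop := ∀ (list1 : List Int), Dom_not_items list1 → Spec_not_items list1 (not_items list1)

-- ===== LEMMAS AND PROOFS =====

-- Both programs compute the range 1..50 filtered by non-membership in list1.
theorem not_items_eq_filter (list1 : List Int) :
    not_items list1
      = (PySem.List.pyRange 1 51 1).filter (fun x => !list1.contains x) := by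
  have hmap := PySem.List.map_pyGetD_pyRange_zero (PySem.List.pyRange 1 51 1) (0 : Int)
  show List.foldl
      (fun reslist f =>
        if list1.contains (PySem.List.pyGetD (PySem.List.pyRange 1 51 1) f 0) then reslist
        else reslist ++ [PySem.List.pyGetD (PySem.List.pyRange 1 51 1) f 0])
      [] (PySem.List.pyRange 0 (PySem.List.len (PySem.List.pyRange 1 51 1)) 1)
    = _
  rw [show (fun (reslist : List Int) f =>
        if list1.contains (PySem.List.pyGetD (PySem.List.pyRange 1 51 1) f 0) then reslist
        else reslist ++ [PySem.List.pyGetD (PySem.List.pyRange 1 51 1) f 0])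
      = (fun reslist f =>
        if (!list1.contains (PySem.List.pyGetD (PySem.List.pyRange 1 51 1) f 0)) = true then
          reslist ++ [PySem.List.pyGetD (PySem.List.pyRange 1 51 1) f 0]
        else reslist) from by
        funext acc x
        cases h : list1.contains (PySem.List.pyGetD (PySem.List.pyRange 1 51 1) x 0) <;> simp]
  rw [PySem.List.foldl_append_if
        (fun f => !list1.contains (PySem.List.pyGetD (PySem.List.pyRange 1 51 1) f 0))
        (fun f => PySem.List.pyGetD (PySem.List.pyRange 1 51 1) f 0)]
  rw [List.nil_append]
  conv_rhs => rw [← hmap, List.filter_map]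
  rfl

set_option maxRecDepth 8192 in
theorem not_items_alt_eq_filter (list1 : List Int) :
    not_items_alt list1
      = (PySem.List.pyRange 1 51 1).filter (fun x => !list1.contains x) := by
  unfold not_items_alt
  have hof : PySem.Set.ofList (PySem.List.pyRange 1 51 1) = PySem.List.pyRange 1 51 1 := by decide
  have hdiff : PySem.Set.diff (PySem.Set.ofList (PySem.List.pyRange 1 51 1)) (PySem.Set.ofList list1)
      = (PySem.List.pyRange 1 51 1).filter (fun x => !list1.contains x) := by
    rw [hof]
    unfold PySem.Set.diff
    apply List.filter_congr
    intro x _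
    congr 1
    rw [Bool.eq_iff_iff]
    simp only [PySem.Set.contains, List.contains_iff_mem]
    exact PySem.Set.mem_ofList list1 x
  rw [hdiff]
  apply PySem.List.sorted_eq_self_of_pairwise
  have hp : (PySem.List.pyRange 1 51 1).Pairwise (fun a b : Int => a < b) := by decide
  exact (hp.filter _).imp (fun h => le_of_lt h)

-- ===== VERDICT (by name: the statement is the Claim_ definition above) =====
theorem not_items_spec : Claim_equal_not_items := by
  intro list1 _
  unfold Spec_not_items
  rw [not_items_eq_filter, not_items_alt_eq_filter]
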